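-- pv_equiv track=rewrite | github.com/bradfordelliott/shorte | src/src/parsers/profile.py | format_comment5
-- ===== SOURCE A (Python) =====
-- def format_comment5(comment, strip_single_line_comments=True):
--
--     lines = comment.split('\n')
--     output = []
--
--     for line in lines:
--
--         chars = list(line)
--         for char in chars:
--             output.append(char)
--             pass
--
--     return ''.join(output)
-- ===== SOURCE B (Python) =====
-- def format_comment5(comment, strip_single_line_comments=True):
--     return comment.replace('\n', '')
-- ===== Notes on version B (the rewrite author's own statement) =====
-- stated objective: simpler
-- what changed: Replaces the split-into-lines plus per-character append loops and the final join with a single str.replace call that deletes newline characters.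
import Mathlib
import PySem

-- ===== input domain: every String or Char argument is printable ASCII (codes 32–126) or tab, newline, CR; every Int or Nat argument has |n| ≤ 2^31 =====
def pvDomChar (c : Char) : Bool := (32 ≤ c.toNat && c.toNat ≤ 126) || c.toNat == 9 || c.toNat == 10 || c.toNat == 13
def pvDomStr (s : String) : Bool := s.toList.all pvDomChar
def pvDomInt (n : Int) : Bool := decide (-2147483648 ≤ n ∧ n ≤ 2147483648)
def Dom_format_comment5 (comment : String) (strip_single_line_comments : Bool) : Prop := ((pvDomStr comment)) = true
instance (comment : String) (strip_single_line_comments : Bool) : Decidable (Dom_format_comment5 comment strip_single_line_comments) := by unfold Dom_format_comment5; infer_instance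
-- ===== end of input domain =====

-- B replaces A's split-into-lines + per-character append loops by a single str.replace call deleting newlines; objective: simpler.

-- ===== PORT A =====
def format_comment5 (comment : String) (strip_single_line_comments : Bool) : String :=
  -- lines = comment.split('\n')   (sep ≠ "", so split? is always `some`)
  let lines : List String := (PySem.Str.split? comment "\n").getD []
  -- for line in lines: for char in list(line): output.append(char)
  let output : List Char :=
    lines.foldl (fun output line =>
      line.toList.foldl (fun output char => output ++ [char]) output) []
  -- return ''.join(output)
  PySem.Str.join "" (output.map (fun c => String.ofList [c]))

-- ===== PORT B =====
def format_comment5_alt (comment : String) (strip_single_line_comments : Bool) : String :=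
  PySem.Str.replace comment "\n" ""

-- ===== PRECONDITION & SPEC =====
def Spec_format_comment5 (comment : String) (strip_single_line_comments : Bool) (out : String) : Prop := out = format_comment5_alt comment strip_single_line_comments
instance (comment : String) (strip_single_line_comments : Bool) (out : String) : Decidable (Spec_format_comment5 comment strip_single_line_comments out) := by unfold Spec_format_comment5; infer_instance

-- ===== CLAIM (what is proved, stated in full; the proofs are below) =====
def Claim_equal_format_comment5 : Prop := ∀ (comment : String) (strip_single_line_comments : Bool), Dom_format_comment5 comment strip_single_line_comments → Spec_format_comment5 comment strip_single_line_comments (format_comment5 comment strip_single_line_comments)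

-- ===== LEMMAS AND PROOFS =====

-- the inner per-character foldl is list append
theorem foldl_push_eq_append (cs acc : List Char) :
    cs.foldl (fun output char => output ++ [char]) acc = acc ++ cs := by
  induction cs generalizing acc with
  | nil => simp
  | cons c t ih => simp [List.foldl, ih]

-- replace.go with a one-char pattern and empty replacement filters that char out
theorem replace_go_filter (fuel : Nat) (l acc : List Char)
    (h : l.length ≤ fuel) :
    PySem.Chars.replace.go ['\n'] [] fuel l acc
      = acc.reverse ++ l.filter (fun c => c ≠ '\n') := by
  induction l generalizing fuel acc with
  | nil =>
    cases fuel with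
    | zero => simp [PySem.Chars.replace.go]
    | succ f => simp [PySem.Chars.replace.go]
  | cons c t ih =>
    cases fuel with
    | zero => simp at h
    | succ f =>
      rw [PySem.Chars.replace.go]
      by_cases hc : c = '\n'
      · subst hc
        rw [if_pos (by simp [List.isPrefixOf])]
        rw [show List.drop (['\n'] : List Char).length ('\n' :: t) = t from rfl]
        rw [ih f _ (by simpa using Nat.le_of_succ_le_succ h)]
        simp
      · rw [if_neg (by simp [List.isPrefixOf]; exact fun h' => hc h'.symm)]
        rw [ih f _ (by simpa using Nat.le_of_succ_le_succ h)]
        simp [hc]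

-- flattening splitOn.go with a one-char separator filters that char out
theorem splitOn_go_flatten (fuel : Nat) (l cur : List Char) (acc : List (List Char))
    (h : l.length ≤ fuel) :
    (PySem.Chars.splitOn.go ['\n'] fuel l cur acc).flatten
      = acc.reverse.flatten ++ cur.reverse ++ l.filter (fun c => c ≠ '\n') := by
  induction l generalizing fuel cur acc with
  | nil =>
    cases fuel with
    | zero => simp [PySem.Chars.splitOn.go]
    | succ f => simp [PySem.Chars.splitOn.go]
  | cons c t ih =>
    cases fuel with
    | zero => simp at h
    | succ f =>
      rw [PySem.Chars.splitOn.go]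
      by_cases hc : c = '\n'
      · subst hc
        rw [if_pos (by simp [List.isPrefixOf])]
        rw [show List.drop (List.length ['\n']) ('\n' :: t) = t from rfl]
        rw [ih f _ _ (by simpa using Nat.le_of_succ_le_succ h)]
        simp
      · rw [if_neg (by simp [List.isPrefixOf]; exact fun h' => hc h'.symm)]
        rw [ih f _ _ (by simpa using Nat.le_of_succ_le_succ h)]
        simp [hc, List.append_assoc]

-- A's split yields the splitOn parts (as strings)
theorem split_getD (comment : String) :
    (PySem.Str.split? comment "\n").getD []
      = (PySem.Chars.splitOn comment.toList ['\n']).map String.ofList := by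
  have hmap := PySem.Str.split?_map comment "\n"
  simp only [PySem.Chars.split?, show ("\n" : String).toList = ['\n'] from rfl] at hmap
  rw [if_neg (by simp)] at hmap
  cases hs : PySem.Str.split? comment "\n" with
  | none => rw [hs] at hmap; simp at hmap
  | some parts =>
    rw [hs] at hmap
    simp only [Option.map_some, Option.some.injEq] at hmap
    simp only [Option.getD_some, ← hmap, List.map_map]
    apply List.ext_getElem (by simp)
    intro i h1 h2
    simp

-- A's nested loops flatten the lines
theorem foldl_lines_eq_flatten (parts : List (List Char)) (acc : List Char) :
    (parts.map String.ofList).foldl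
      (fun output line => line.toList.foldl (fun output char => output ++ [char]) output) acc
    = acc ++ parts.flatten := by
  induction parts generalizing acc with
  | nil => simp
  | cons p t ih =>
    rw [List.map_cons, List.foldl_cons,
        show (String.ofList p).toList = p by simp,
        foldl_push_eq_append, ih, List.flatten_cons, List.append_assoc]

theorem toList_A (comment : String) (b : Bool) :
    (format_comment5 comment b).toList = comment.toList.filter (fun c => c ≠ '\n') := by
  simp only [format_comment5]
  rw [PySem.Str.toList_join, split_getD, foldl_lines_eq_flatten]
  simp only [List.nil_append, List.map_map]
  have : (fun c => (String.ofList [c]).toList) = (fun c : Char => [c]) := by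
    funext c; simp
  rw [show (String.toList ∘ fun c => String.ofList [c]) = (fun c : Char => [c]) by
        funext c; simp]
  rw [show ("" : String).toList = ([] : List Char) from rfl,
      PySem.Chars.join_nil_singletons]
  unfold PySem.Chars.splitOn
  simpa using splitOn_go_flatten (comment.toList.length + 1) comment.toList [] []
    (Nat.le_succ _)

theorem toList_B (comment : String) (b : Bool) :
    (format_comment5_alt comment b).toList = comment.toList.filter (fun c => c ≠ '\n') := by
  simp only [format_comment5_alt]
  rw [PySem.Str.toList_replace]
  show PySem.Chars.replace comment.toList ['\n'] [] = _
  unfold PySem.Chars.replace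
  rw [if_neg (by simp)]
  simpa using replace_go_filter comment.toList.length comment.toList [] (Nat.le_refl _)

-- ===== VERDICT (by name: the statement is the Claim_ definition above) =====
theorem format_comment5_spec : Claim_equal_format_comment5 := by
  intro comment b _
  unfold Spec_format_comment5
  exact String.toList_injective ((toList_A comment b).trans (toList_B comment b).symm)
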